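-- pv_equiv track=rewrite | github.com/gero0/tsptools | tsprandom/vis.py | cmp_permutations
-- ===== SOURCE A (Python) =====
-- def cmp_permutations(perm1, perm2):
--     # invert first permutation
--     perm_1_inv = perm1[:]
--     for i in range(0, len(perm1)):
--         perm_1_inv[perm1[i]] = i
--
--     # Compose the two permutations
--     p = [0 for i in range(0, len(perm1))]
--     for i in range(0, len(perm1)):
--         p[i] = perm2[perm_1_inv[i]]
--
--     count = 0;
--     for i in range(0, len(perm1)):
--         while p[i] != i :
--             a = p[p[i]]
--             b = p[i]
--             p[a], p[b] = p[b], p[a]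
--             count += 1
--
--     return count
-- ===== SOURCE B (Python) =====
-- def cmp_permutations(perm1, perm2):
--     # invert first permutation (kept identical to A so indexing behaviour matches)
--     perm_1_inv = perm1[:]
--     for i in range(0, len(perm1)):
--         perm_1_inv[perm1[i]] = i
--
--     # Compose the two permutations
--     p = [0 for i in range(0, len(perm1))]
--     for i in range(0, len(perm1)):
--         p[i] = perm2[perm_1_inv[i]]
--
--     # count cycles of p by walking each cycle once; answer = n - #cycles
--     n = len(perm1)
--     visited = [False] * n
--     cycles = 0
--     for i in range(n):
--         if not visited[i]:
--             cycles += 1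
--             j = i
--             while not visited[j]:
--                 visited[j] = True
--                 j = p[j]
--     return n - cycles
-- ===== Notes on version B (the rewrite author's own statement) =====
-- stated objective: alternative
-- what changed: The destructive swap-counting loop (repeatedly swapping entries of the composed permutation p until it is the identity) is replaced by a non-destructive cycle count with a visited array, returning n - cycles.
import Mathlib
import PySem

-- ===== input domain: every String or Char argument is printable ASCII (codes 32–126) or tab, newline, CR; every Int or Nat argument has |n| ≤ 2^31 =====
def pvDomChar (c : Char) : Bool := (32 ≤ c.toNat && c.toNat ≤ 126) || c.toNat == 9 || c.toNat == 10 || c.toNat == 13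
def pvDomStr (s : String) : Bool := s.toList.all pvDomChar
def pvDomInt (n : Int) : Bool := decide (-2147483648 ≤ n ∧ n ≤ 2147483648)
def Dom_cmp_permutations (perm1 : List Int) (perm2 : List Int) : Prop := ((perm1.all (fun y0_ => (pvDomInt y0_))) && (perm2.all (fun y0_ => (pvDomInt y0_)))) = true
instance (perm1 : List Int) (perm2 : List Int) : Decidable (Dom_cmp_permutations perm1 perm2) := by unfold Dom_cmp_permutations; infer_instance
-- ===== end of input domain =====

-- B replaces A's destructive swap-counting loop by a non-destructive cycle count
-- (visited-array walk) returning n - cycles; objective: alternative (same cost).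

-- ===== PORT A =====
-- shared helper: the first two loops, character-identical in Source A and Source B
-- (invert perm1, then compose p[i] = perm2[perm_1_inv[i]])
def pvCompose (perm1 : List Int) (perm2 : List Int) : List Int :=
  let inv := (PySem.List.pyRange 0 perm1.length 1).foldl
    (fun inv i => PySem.List.pySetD inv (PySem.List.pyGetD perm1 i 0) i) perm1
  (PySem.List.pyRange 0 perm1.length 1).foldl
    (fun p i => PySem.List.pySetD p i (PySem.List.pyGetD perm2 (PySem.List.pyGetD inv i 0) 0))
    ((PySem.List.pyRange 0 perm1.length 1).map (fun _ => (0 : Int)))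

-- A's inner 'while p[i] != i' loop; fuel is a totality guard only
def pvInner (i : Int) : Nat → List Int → Int → List Int × Int
  | 0, p, c => (p, c)
  | fuel+1, p, c =>
    if PySem.List.pyGetD p i 0 ≠ i then
      let a := PySem.List.pyGetD p (PySem.List.pyGetD p i 0) 0
      let b := PySem.List.pyGetD p i 0
      pvInner i fuel
        (PySem.List.pySetD (PySem.List.pySetD p a (PySem.List.pyGetD p b 0)) b
          (PySem.List.pyGetD p a 0))
        (c + 1)
    else (p, c)

def cmp_permutations (perm1 : List Int) (perm2 : List Int) : Int :=
  let p := pvCompose perm1 perm2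
  ((PySem.List.pyRange 0 perm1.length 1).foldl
    (fun (s : List Int × Int) i => pvInner i perm1.length s.1 s.2) (p, 0)).2

-- ===== PORT B =====
-- B's inner 'while not visited[j]' walk; fuel is a totality guard only
def pvWalk (p : List Int) : Nat → List Bool → Int → List Bool
  | 0, visited, _ => visited
  | fuel+1, visited, j =>
    if PySem.List.pyGetD visited j false = false then
      pvWalk p fuel (PySem.List.pySetD visited j true) (PySem.List.pyGetD p j 0)
    else visited

def cmp_permutations_alt (perm1 : List Int) (perm2 : List Int) : Int :=
  let p := pvCompose perm1 perm2
  let n := perm1.length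
  let res := (PySem.List.pyRange 0 (n : Int) 1).foldl
    (fun (s : List Bool × Int) i =>
      if PySem.List.pyGetD s.1 i false = false then
        (pvWalk p (n + 1) s.1 i, s.2 + 1)
      else s)
    (List.replicate n false, 0)
  (n : Int) - res.2

-- ===== PRECONDITION & SPEC =====
-- Closed-form value of perm_1_inv[i] after the first loop: the last j with
-- perm1[j] wrapping to position i, or the untouched original entry perm1[i]
def pvInvVal (perm1 : List Int) (i : Int) : Int :=
  match ((List.range perm1.length).filter
      (fun (j : ℕ) => PySem.List.pyGetD perm1 (j : Int) 0 % (perm1.length : Int) = i)).getLast? with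
  | some j => (j : Int)
  | none => PySem.List.pyGetD perm1 i 0

-- Closed-form value of the composed p[i] = perm2[perm_1_inv[i]] (wrapping index)
def pvPVal (perm1 : List Int) (perm2 : List Int) (i : Int) : Int :=
  PySem.List.pyGetD perm2 (pvInvVal perm1 i % (perm2.length : Int)) 0

-- Pre_ admits exactly the inputs on which A returns normally: both build loops
-- index in range (Python wraparound allowed) and the composed list p is an exact
-- permutation of 0..n-1; elsewhere A raises IndexError or its swap loop never
-- terminates.
def Pre_cmp_permutations (perm1 : List Int) (perm2 : List Int) : Prop :=
  (∀ i : ℕ, i < perm1.length → -(perm1.length : Int) ≤ PySem.List.pyGetD perm1 (i : Int) 0 ∧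
    PySem.List.pyGetD perm1 (i : Int) 0 < (perm1.length : Int)) ∧
  (∀ i : ℕ, i < perm1.length → -(perm2.length : Int) ≤ pvInvVal perm1 (i : Int) ∧
    pvInvVal perm1 (i : Int) < (perm2.length : Int)) ∧
  (∀ i : ℕ, i < perm1.length → 0 ≤ pvPVal perm1 perm2 (i : Int) ∧
    pvPVal perm1 perm2 (i : Int) < (perm1.length : Int)) ∧
  (∀ i : ℕ, i < perm1.length → ∀ j : ℕ, j < perm1.length →
    pvPVal perm1 perm2 (i : Int) = pvPVal perm1 perm2 (j : Int) → i = j)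
instance (perm1 : List Int) (perm2 : List Int) : Decidable (Pre_cmp_permutations perm1 perm2) := by
  unfold Pre_cmp_permutations; infer_instance

def pvWitness_cmp_permutations : List Int × List Int := ([1, 0, 2], [2, 1, 0])

def Spec_cmp_permutations (perm1 : List Int) (perm2 : List Int) (out : Int) : Prop := out = cmp_permutations_alt perm1 perm2
instance (perm1 : List Int) (perm2 : List Int) (out : Int) : Decidable (Spec_cmp_permutations perm1 perm2 out) := by unfold Spec_cmp_permutations; infer_instance

-- ===== CLAIM (what is proved, stated in full; the proofs are below) =====
def Claim_equal_cmp_permutations : Prop := ∀ (perm1 : List Int) (perm2 : List Int), Dom_cmp_permutations perm1 perm2 → Pre_cmp_permutations perm1 perm2 → Spec_cmp_permutations perm1 perm2 (cmp_permutations perm1 perm2)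

-- ===== LEMMAS AND PROOFS =====

-- the list viewed as a function on Int indices (default 0 out of range)
def fL (l : List Int) : Int → Int := fun j => PySem.List.pyGetD l j 0

-- l encodes a permutation of {0, …, l.length-1}
def PermL (l : List Int) : Prop :=
  (∀ j : Int, 0 ≤ j → j < l.length → 0 ≤ fL l j ∧ fL l j < l.length) ∧
  (∀ j k : Int, 0 ≤ j → j < l.length → 0 ≤ k → k < l.length → fL l j = fL l k → j = k)

lemma length_fL_set (l : List Int) (a v : Int) :
    (PySem.List.pySetD l a v).length = l.length :=
  PySem.List.length_pySetD l a v

lemma fL_set (l : List Int) (a v j : Int) (ha : 0 ≤ a) (ha' : a < l.length)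
    (hj : 0 ≤ j) (hj' : j < l.length) :
    fL (PySem.List.pySetD l a v) j = if j = a then v else fL l j := by
  have h1 : PySem.List.pySetD l a v = l.set a.toNat v := PySem.List.pySetD_of_nonneg _ _ ha
  have hjn : j.toNat < l.length := by omega
  have han : a.toNat < l.length := by omega
  have hjn2 : (j : Int) < ((PySem.List.pySetD l a v).length : Int) := by
    rw [length_fL_set]; exact hj'
  rw [fL, fL, PySem.List.pyGetD_eq_getElem _ 0 hj hjn2, PySem.List.pyGetD_eq_getElem _ 0 hj (by exact_mod_cast hj')]
  have : (PySem.List.pySetD l a v)[j.toNat]'(by rw [length_fL_set]; exact hjn)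
      = (l.set a.toNat v)[j.toNat]'(by simpa using hjn) := by
    congr 1
  rw [this, List.getElem_set]
  by_cases hja : j = a
  · simp [hja]
  · have : ¬ a.toNat = j.toNat := by omega
    simp [hja, this]

-- iterates stay in range
lemma iter_range (l : List Int) (hp : PermL l) (i : Int) (h0 : 0 ≤ i) (h1 : i < l.length) :
    ∀ k : ℕ, 0 ≤ (fL l)^[k] i ∧ (fL l)^[k] i < l.length := by
  intro k
  induction k with
  | zero => exact ⟨h0, h1⟩
  | succ k ih =>
    rw [Function.iterate_succ_apply']
    exact hp.1 _ ih.1 ih.2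

lemma iter_cancel (l : List Int) (hp : PermL l) (i : Int) (h0 : 0 ≤ i) (h1 : i < l.length) :
    ∀ (a d : ℕ), (fL l)^[a + d] i = (fL l)^[a] i → (fL l)^[d] i = i := by
  intro a
  induction a with
  | zero => intro d h; simpa using h
  | succ a ih =>
    intro d h
    apply ih
    have h2 : (fL l)^[(a + d) + 1] i = (fL l)^[a + 1] i := by
      have : a + 1 + d = (a + d) + 1 := by omega
      rw [this] at h; exact h
    rw [Function.iterate_succ_apply', Function.iterate_succ_apply'] at h2
    exact hp.2 _ _ (iter_range l hp i h0 h1 _).1 (iter_range l hp i h0 h1 _).2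
      (iter_range l hp i h0 h1 _).1 (iter_range l hp i h0 h1 _).2 h2

-- every in-range point is periodic, with minimal period ≤ l.length
lemma per_exists (l : List Int) (hp : PermL l) (i : Int) (h0 : 0 ≤ i) (h1 : i < l.length) :
    0 < Function.minimalPeriod (fL l) i ∧ Function.minimalPeriod (fL l) i ≤ l.length := by
  obtain ⟨x, hx, y, hy, hxy, hfxy⟩ :=
    Finset.exists_ne_map_eq_of_card_lt_of_maps_to
      (s := Finset.range (l.length + 1)) (t := Finset.Ico (0 : Int) (l.length : Int))
      (f := fun k => (fL l)^[k] i)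
      (by rw [Finset.card_range, Int.card_Ico]; omega)
      (by intro k _
          exact Finset.mem_Ico.mpr ⟨(iter_range l hp i h0 h1 k).1, (iter_range l hp i h0 h1 k).2⟩)
  simp only [Finset.mem_range] at hx hy
  -- wlog x < y
  rcases lt_or_gt_of_ne hxy with hlt | hlt
  case _ =>
    have hper : (fL l)^[y - x] i = i := by
      apply iter_cancel l hp i h0 h1 x
      rw [show x + (y - x) = y by omega]; exact hfxy.symm
    have hP : Function.IsPeriodicPt (fL l) (y - x) i := hper
    exact ⟨hP.minimalPeriod_pos (by omega), le_trans (hP.minimalPeriod_le (by omega)) (by omega)⟩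
  case _ =>
    have hper : (fL l)^[x - y] i = i := by
      apply iter_cancel l hp i h0 h1 y
      rw [show y + (x - y) = x by omega]; exact hfxy
    have hP : Function.IsPeriodicPt (fL l) (x - y) i := hper
    exact ⟨hP.minimalPeriod_pos (by omega), le_trans (hP.minimalPeriod_le (by omega)) (by omega)⟩

lemma minimalPeriod_eq_of (f : Int → Int) (x : Int) (m : ℕ) (hm : 0 < m)
    (h : f^[m] x = x) (hmin : ∀ k, 0 < k → k < m → f^[k] x ≠ x) :
    Function.minimalPeriod f x = m := by
  have hP : Function.IsPeriodicPt f m x := h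
  have hle := hP.minimalPeriod_le hm
  have hpos := hP.minimalPeriod_pos hm
  rcases lt_or_eq_of_le hle with hlt | heq
  · exact absurd (Function.iterate_minimalPeriod (f := f) (x := x)) (hmin _ hpos hlt)
  · exact heq

-- A's inner loop: fixes the orbit of i and adds (period - 1) to the counter
lemma pvInner_spec (m : ℕ) : ∀ (l : List Int) (i c : Int) (fuel : ℕ),
    PermL l → 0 ≤ i → i < l.length →
    Function.minimalPeriod (fL l) i = m → m ≤ fuel →
    ∃ l', pvInner i fuel l c = (l', c + (m : Int) - 1) ∧ l'.length = l.length ∧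
      (∀ j : Int, 0 ≤ j → j < l.length →
        fL l' j = if (∃ k : ℕ, k < m ∧ (fL l)^[k] i = j) then j else fL l j) := by
  induction m with
  | zero =>
    intro l i c fuel hp h0 h1 hper _
    have := (per_exists l hp i h0 h1).1
    omega
  | succ m ih =>
    intro l i c fuel hp h0 h1 hper hfuel
    obtain ⟨fu, rfl⟩ : ∃ fu, fuel = fu + 1 := ⟨fuel - 1, by omega⟩
    by_cases hfix : fL l i = i
    · -- f i = i: the minimal period is 1, the loop exits at once
      have hm0 : m = 0 := by
        have h1' : Function.minimalPeriod (fL l) i = 1 :=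
          minimalPeriod_eq_of _ _ 1 (by omega) (by simpa using hfix) (by intro k hk hk1; omega)
        omega
      subst hm0
      refine ⟨l, ?_, rfl, ?_⟩
      · have hret : pvInner i (fu + 1) l c = (l, c) := by
          simp only [pvInner]
          rw [if_neg (by simpa [fL] using (not_not.mpr hfix))]
        rw [hret]
        norm_num
      · intro j hj hj'
        by_cases hji : j = i
        · subst hji
          rw [if_pos ⟨0, by omega, rfl⟩]
          exact hfix
        · rw [if_neg]
          rintro ⟨k, hk, hkj⟩
          have hk0 : k = 0 := by omega
          subst hk0
          exact hji (by simpa using hkj.symm)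
    · -- f i ≠ i: one swap, then the loop continues with minimal period m
      have hfixg : PySem.List.pyGetD l i 0 ≠ i := hfix
      have hm1 : 1 ≤ m := by
        by_contra h
        have hm : m = 0 := by omega
        have h2 : (fL l)^[1] i = i := by
          have := Function.iterate_minimalPeriod (f := fL l) (x := i)
          rwa [hper, hm] at this
        exact hfix (by simpa using h2)
      obtain ⟨b, hb⟩ : ∃ x, x = fL l i := ⟨_, rfl⟩
      obtain ⟨a, ha⟩ : ∃ x, x = fL l b := ⟨_, rfl⟩
      have hbr : 0 ≤ b ∧ b < l.length := by rw [hb]; exact hp.1 i h0 h1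
      have har : 0 ≤ a ∧ a < l.length := by rw [ha]; exact hp.1 b hbr.1 hbr.2
      have hfar : 0 ≤ fL l a ∧ fL l a < l.length := hp.1 a har.1 har.2
      have hbi : b ≠ i := by rw [hb]; exact hfix
      have hab : a ≠ b := by
        intro h
        exact hbi (hp.2 b i hbr.1 hbr.2 h0 h1 (by rw [← ha, ← hb, h]))
      have hb1 : (fL l)^[1] i = b := by simp [hb]
      have ha2 : (fL l)^[2] i = a := by
        rw [show (2 : ℕ) = 1 + 1 from rfl, Function.iterate_succ_apply', hb1, ← ha]
      obtain ⟨l2, hl2⟩ : ∃ x, x =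
          PySem.List.pySetD (PySem.List.pySetD l a (PySem.List.pyGetD l b 0)) b
            (PySem.List.pyGetD l a 0) := ⟨_, rfl⟩
      have hlen2 : l2.length = l.length := by
        rw [hl2, length_fL_set, length_fL_set]
      -- pointwise description of the list after the swap
      have hup : ∀ j : Int, 0 ≤ j → j < l.length →
          fL l2 j = if j = b then fL l a else if j = a then a else fL l j := by
        intro j hj hj'
        rw [hl2]
        rw [fL_set _ b _ j hbr.1 (by rw [length_fL_set]; exact hbr.2) hj
          (by rw [length_fL_set]; exact hj')]
        by_cases hjb : j = b
        · simp only [if_pos hjb]; rfl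
        · simp only [if_neg hjb]
          rw [fL_set l a _ j har.1 har.2 hj hj']
          have : PySem.List.pyGetD l b 0 = a := ha.symm
          rw [this]
      have hfane : fL l a ≠ a := by
        intro h
        exact hab (hp.2 a b har.1 har.2 hbr.1 hbr.2 (by rw [h, ha]))
      -- the swapped list is still a permutation
      have hp2 : PermL l2 := by
        constructor
        · intro j hj hj'
          rw [hlen2] at hj' ⊢
          rw [hup j hj hj']
          split_ifs with h1' h2'
          · exact hfar
          · exact har
          · exact hp.1 j hj hj'
        · intro j k hj hj' hk hk' hjk
          rw [hlen2] at hj' hk'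
          rw [hup j hj hj', hup k hk hk'] at hjk
          by_cases hjb : j = b
          · rw [if_pos hjb] at hjk
            by_cases hkb : k = b
            · rw [hjb, hkb]
            · rw [if_neg hkb] at hjk
              by_cases hka : k = a
              · rw [if_pos hka] at hjk
                exact (hfane hjk).elim
              · rw [if_neg hka] at hjk
                exact (hka (hp.2 a k har.1 har.2 hk hk' hjk).symm).elim
          · rw [if_neg hjb] at hjk
            by_cases hja : j = a
            · rw [if_pos hja] at hjk
              by_cases hkb : k = b
              · rw [if_pos hkb] at hjk
                exact (hfane hjk.symm).elim
              · rw [if_neg hkb] at hjk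
                by_cases hka : k = a
                · rw [hja, hka]
                · rw [if_neg hka] at hjk
                  exact (hkb (hp.2 b k hbr.1 hbr.2 hk hk' (by rw [← ha]; exact hjk)).symm).elim
            · rw [if_neg hja] at hjk
              by_cases hkb : k = b
              · rw [if_pos hkb] at hjk
                exact (hja (hp.2 j a hj hj' har.1 har.2 hjk)).elim
              · rw [if_neg hkb] at hjk
                by_cases hka : k = a
                · rw [if_pos hka] at hjk
                  exact (hjb (hp.2 j b hj hj' hbr.1 hbr.2 (by rw [hjk, ha]))).elim
                · rw [if_neg hka] at hjk
                  exact hp.2 j k hj hj' hk hk' hjk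
      -- one unfolding of the loop
      have hstep : pvInner i (fu + 1) l c = pvInner i fu l2 (c + 1) := by
        conv_lhs => rw [pvInner]
        rw [if_pos hfixg, hl2, ha, hb]
        rfl
      by_cases hai : a = i
      · -- 2-cycle (i b): one swap fixes both and the loop stops
        have hmp2 : Function.minimalPeriod (fL l) i = 2 := by
          apply minimalPeriod_eq_of _ _ 2 (by omega) (by rw [ha2, hai])
          intro k hk hk2
          have : k = 1 := by omega
          rw [this, hb1]; exact hbi
        have hm : m = 1 := by omega
        have hper2 : Function.minimalPeriod (fL l2) i = 1 := by
          apply minimalPeriod_eq_of _ _ 1 (by omega)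
          · have h2 : fL l2 i = i := by
              rw [hup i h0 h1, if_neg (Ne.symm hbi), if_pos hai.symm, hai]
            rw [Function.iterate_one]; exact h2
          · intro k hk hk1; omega
        obtain ⟨l'', hrun, hlen'', hchar⟩ :=
          ih l2 i (c + 1) fu hp2 h0 (by rw [hlen2]; exact h1) (by rw [hper2, hm]) (by omega)
        refine ⟨l'', ?_, by rw [hlen'', hlen2], ?_⟩
        · rw [hstep, hrun, hm]
          congr 1
          push_cast; ring
        · intro j hj hj'
          have hch := hchar j hj (by rw [hlen2]; exact hj')
          rw [hm] at hch
          by_cases hji : j = i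
          · rw [if_pos ⟨0, by omega, by simp [hji]⟩]
            rw [if_pos ⟨0, by omega, by simp [hji]⟩] at hch
            exact hch
          · by_cases hjb : j = b
            · rw [if_pos ⟨1, by omega, by rw [hb1, hjb]⟩]
              rw [if_neg (by
                rintro ⟨k, hk, hkj⟩
                have hk0 : k = 0 := by omega
                subst hk0
                exact hji (by simpa using hkj.symm))] at hch
              rw [hch, hup j hj hj', if_pos hjb, hai, ← hb, hjb]
            · rw [if_neg (by
                rintro ⟨k, hk, hkj⟩
                rcases (by omega : k = 0 ∨ k = 1) with hk0 | hk0 <;> subst hk0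
                · exact hji (by simpa using hkj.symm)
                · exact hjb (by rw [← hkj, hb1]))]
              rw [if_neg (by
                rintro ⟨k, hk, hkj⟩
                have hk0 : k = 0 := by omega
                subst hk0
                exact hji (by simpa using hkj.symm))] at hch
              rw [hch, hup j hj hj', if_neg hjb, if_neg (by rw [hai]; exact hji)]
      · -- longer cycle: the swap fixes a and shortens the cycle of i by one
        have hl2i : fL l2 i = b := by
          rw [hup i h0 h1, if_neg (Ne.symm hbi), if_neg (fun h => hai h.symm), ← hb]
        have hm2 : 2 ≤ m := by
          by_contra h
          have hm : m = 1 := by omega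
          have h2 : (fL l)^[2] i = i := by
            have := Function.iterate_minimalPeriod (f := fL l) (x := i)
            rwa [hper, hm] at this
          exact hai (by rw [← ha2, h2])
      -- iterates of l2 follow those of l, skipping a
        have hiter : ∀ k, 2 ≤ k → k ≤ m → (fL l2)^[k] i = (fL l)^[k + 1] i := by
          intro k
          induction k with
          | zero => intro h _; omega
          | succ k ihk =>
            intro hk2 hkm
            by_cases hk2' : k < 2
            · -- k + 1 = 2
              have hk1 : k = 1 := by omega
              subst hk1
              have e1 : (fL l2)^[1 + 1] i = fL l2 ((fL l2)^[1] i) :=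
                Function.iterate_succ_apply' _ _ _
              have e2 : (fL l)^[1 + 1 + 1] i = fL l ((fL l)^[1 + 1] i) :=
                Function.iterate_succ_apply' _ _ _
              rw [e1, e2, Function.iterate_one, hl2i, hup b hbr.1 hbr.2, if_pos rfl,
                show (1 + 1 : ℕ) = 2 from rfl, ha2]
            · have hk2'' : 2 ≤ k := by omega
              have hih := ihk hk2'' (by omega)
              rw [Function.iterate_succ_apply', hih]
              have hrange := iter_range l hp i h0 h1 (k + 1)
              have hne_a : (fL l)^[k + 1] i ≠ a := by
                rw [← ha2]
                intro hcon
                have := (Function.iterate_eq_iterate_iff_of_lt_minimalPeriod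
                  (f := fL l) (x := i) (by omega) (by omega)).mp hcon
                omega
              have hne_b : (fL l)^[k + 1] i ≠ b := by
                rw [← hb1]
                intro hcon
                have := (Function.iterate_eq_iterate_iff_of_lt_minimalPeriod
                  (f := fL l) (x := i) (by omega) (by omega)).mp hcon
                omega
              rw [hup _ hrange.1 hrange.2, if_neg hne_b, if_neg hne_a]
              exact (Function.iterate_succ_apply' (fL l) (k + 1) i).symm
        have hper2 : Function.minimalPeriod (fL l2) i = m := by
          apply minimalPeriod_eq_of _ _ m (by omega)
          · rw [hiter m hm2 le_rfl]
            have := Function.iterate_minimalPeriod (f := fL l) (x := i)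
            rwa [hper] at this
          · intro k hk hkm
            by_cases hk1 : k = 1
            · rw [hk1]; simpa using (hl2i ▸ hbi : fL l2 i ≠ i)
            · rw [hiter k (by omega) (by omega)]
              intro hcon
              have h0' : (fL l)^[k + 1] i = (fL l)^[0] i := by simpa using hcon
              have := (Function.iterate_eq_iterate_iff_of_lt_minimalPeriod
                (f := fL l) (x := i) (by omega) (by omega)).mp h0'
              omega
        obtain ⟨l'', hrun, hlen'', hchar⟩ :=
          ih l2 i (c + 1) fu hp2 h0 (by rw [hlen2]; exact h1) hper2 (by omega)
        refine ⟨l'', ?_, by rw [hlen'', hlen2], ?_⟩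
        · rw [hstep, hrun]
          congr 1
          push_cast; ring
        · -- translate the orbit condition from l2 back to l
          have hcond : ∀ j : Int, (∃ k : ℕ, k < m ∧ (fL l2)^[k] i = j) ↔
              ((∃ k : ℕ, k < m + 1 ∧ (fL l)^[k] i = j) ∧ j ≠ a) := by
            intro j
            constructor
            · rintro ⟨k, hk, hkj⟩
              by_cases hk0 : k = 0
              · subst hk0
                refine ⟨⟨0, by omega, by simpa using hkj⟩, ?_⟩
                simp only [Function.iterate_zero, id] at hkj
                rw [← hkj]; exact fun h => hai h.symm
              · by_cases hk1 : k = 1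
                · subst hk1
                  refine ⟨⟨1, by omega, by rw [hb1, ← hkj]; simpa using hl2i.symm⟩, ?_⟩
                  have : j = b := by rw [← hkj]; simpa using hl2i
                  rw [this]; exact fun h => hab h.symm
                · have hk2' : 2 ≤ k := by omega
                  rw [hiter k hk2' (by omega)] at hkj
                  refine ⟨⟨k + 1, by omega, hkj⟩, ?_⟩
                  rw [← hkj, ← ha2]
                  intro hcon
                  have := (Function.iterate_eq_iterate_iff_of_lt_minimalPeriod
                    (f := fL l) (x := i) (by omega) (by omega)).mp hcon
                  omega
            · rintro ⟨⟨k, hk, hkj⟩, hja⟩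
              by_cases hk0 : k = 0
              · exact ⟨0, by omega, by subst hk0; simpa using hkj⟩
              · by_cases hk1 : k = 1
                · refine ⟨1, by omega, ?_⟩
                  subst hk1
                  rw [hb1] at hkj
                  simpa [hl2i] using hkj
                · by_cases hk2' : k = 2
                  · exfalso; apply hja; rw [← hkj]; subst hk2'; rw [ha2]
                  · refine ⟨k - 1, by omega, ?_⟩
                    rw [hiter (k - 1) (by omega) (by omega),
                      show k - 1 + 1 = k from by omega]
                    exact hkj
          intro j hj hj'
          have hch := hchar j hj (by rw [hlen2]; exact hj')
          by_cases hgc : ∃ k : ℕ, k < m + 1 ∧ (fL l)^[k] i = j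
          · rw [if_pos hgc]
            by_cases hja : j = a
            · rw [if_neg (fun hcon => ((hcond j).mp hcon).2 hja)] at hch
              rw [hch, hup j hj hj', if_neg (by rw [hja]; exact hab), if_pos hja, hja]
            · rw [if_pos ((hcond j).mpr ⟨hgc, hja⟩)] at hch
              exact hch
          · rw [if_neg hgc]
            rw [if_neg (fun hcon => hgc ((hcond j).mp hcon).1)] at hch
            rw [hch, hup j hj hj',
              if_neg (fun hcon => hgc ⟨1, by omega, by rw [hb1, hcon]⟩),
              if_neg (fun hcon => hgc ⟨2, by omega, by rw [ha2, hcon]⟩)]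

-- pointwise description of a defaulted set, for any element type
lemma getSet_pt {α : Type} (d : α) (v : List α) (x j : Int) (val : α)
    (hx : 0 ≤ x) (hx' : x < v.length) (hj : 0 ≤ j) (hj' : j < v.length) :
    PySem.List.pyGetD (PySem.List.pySetD v x val) j d = if j = x then val else PySem.List.pyGetD v j d := by
  have h1 : PySem.List.pySetD v x val = v.set x.toNat val := PySem.List.pySetD_of_nonneg _ _ hx
  have hjn : j.toNat < v.length := by omega
  rw [PySem.List.pyGetD_eq_getElem _ d hj (by rw [PySem.List.length_pySetD]; exact hj'),
    PySem.List.pyGetD_eq_getElem _ d hj hj']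
  have h2 : (PySem.List.pySetD v x val)[j.toNat]'(by rw [PySem.List.length_pySetD]; exact hjn)
      = (v.set x.toNat val)[j.toNat]'(by simpa using hjn) := by congr 1
  rw [h2, List.getElem_set]
  by_cases hjx : j = x
  · simp [hjx]
  · have : ¬ x.toNat = j.toNat := by omega
    simp [hjx, this]

lemma getD_replicate_false (n : ℕ) (j : Int) (hj : 0 ≤ j) (hj' : j < n) :
    PySem.List.pyGetD (List.replicate n false) j false = false := by
  rw [PySem.List.pyGetD_eq_getElem _ false hj (by simpa using hj')]
  simp

-- orbits of points outside an iff-closed set stay outside it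
lemma orbit_notin (p : List Int) (V : Finset ℤ)
    (hVcl : ∀ x : ℤ, 0 ≤ x → x < p.length → (fL p x ∈ V ↔ x ∈ V))
    (i : Int) (hp : PermL p) (h0 : 0 ≤ i) (h1 : i < p.length) (hiV : i ∉ V) :
    ∀ t : ℕ, (fL p)^[t] i ∉ V := by
  intro t
  induction t with
  | zero => simpa using hiV
  | succ t ih =>
    rw [Function.iterate_succ_apply']
    intro hmem
    exact ih ((hVcl _ (iter_range p hp i h0 h1 t).1 (iter_range p hp i h0 h1 t).2).mp hmem)

-- B's walk marks exactly the orbit of i (on top of the already-marked V)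
lemma pvWalk_aux (p : List Int) (hp : PermL p) (i : Int) (h0 : 0 ≤ i) (h1 : i < p.length)
    (V : Finset ℤ)
    (hVcl : ∀ x : ℤ, 0 ≤ x → x < p.length → (fL p x ∈ V ↔ x ∈ V)) (hiV : i ∉ V) :
    ∀ r : ℕ, ∀ (v : List Bool) (fuel : ℕ), v.length = p.length →
      (∀ j : Int, 0 ≤ j → j < p.length →
        (PySem.List.pyGetD v j false = true ↔
          j ∈ V ∪ (Finset.range (Function.minimalPeriod (fL p) i - r)).image
            (fun t => (fL p)^[t] i))) →
      r + 1 ≤ fuel → 0 < r → r ≤ Function.minimalPeriod (fL p) i →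
      (pvWalk p fuel v ((fL p)^[Function.minimalPeriod (fL p) i - r] i)).length = p.length ∧
      (∀ j : Int, 0 ≤ j → j < p.length →
        (PySem.List.pyGetD (pvWalk p fuel v ((fL p)^[Function.minimalPeriod (fL p) i - r] i)) j false = true ↔
          j ∈ V ∪ (Finset.range (Function.minimalPeriod (fL p) i)).image (fun t => (fL p)^[t] i))) := by
  have hmper := per_exists p hp i h0 h1
  intro r
  induction r with
  | zero => intro _ _ _ _ _ h; omega
  | succ r ihr =>
    intro v fuel hvlen hvmark hfuel hr hrm
    obtain ⟨fu, rfl⟩ : ∃ fu, fuel = fu + 1 := ⟨fuel - 1, by omega⟩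
    set m := Function.minimalPeriod (fL p) i with hm
    set x := (fL p)^[m - (r + 1)] i with hx
    have hxr : 0 ≤ x ∧ x < p.length := iter_range p hp i h0 h1 _
    -- x is not yet marked
    have hxun : PySem.List.pyGetD v x false = false := by
      have h3 := hvmark x hxr.1 hxr.2
      rcases Bool.eq_false_or_eq_true (PySem.List.pyGetD v x false) with hb | hb
      swap
      · exact hb
      · exfalso
        rcases Finset.mem_union.mp (h3.mp hb) with hmem | hmem
        · exact orbit_notin p V hVcl i hp h0 h1 hiV _ hmem
        · obtain ⟨t, ht, hteq⟩ := Finset.mem_image.mp hmem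
          rw [Finset.mem_range] at ht
          have := (Function.iterate_eq_iterate_iff_of_lt_minimalPeriod
            (f := fL p) (x := i) (by omega) (by omega)).mp (hteq.trans rfl)
          omega
    -- one step of the walk
    have hstep : pvWalk p (fu + 1) v x =
        pvWalk p fu (PySem.List.pySetD v x true) (PySem.List.pyGetD p x 0) := by
      conv_lhs => rw [pvWalk]
      rw [if_pos hxun]
    have hmark' : ∀ j : Int, 0 ≤ j → j < p.length →
        (PySem.List.pyGetD (PySem.List.pySetD v x true) j false = true ↔
          j ∈ V ∪ (Finset.range (m - r)).image (fun t => (fL p)^[t] i)) := by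
      intro j hj hj'
      rw [getSet_pt false v x j true hxr.1 (by rw [hvlen]; exact hxr.2) hj (by rw [hvlen]; exact hj')]
      have hsplit : (Finset.range (m - r)) = insert (m - (r + 1)) (Finset.range (m - (r + 1))) := by
        rw [show m - r = (m - (r + 1)) + 1 from by omega, Finset.range_add_one]
      rw [hsplit, Finset.image_insert]
      by_cases hjx : j = x
      · simp only [if_pos hjx]
        constructor
        · intro _
          exact Finset.mem_union.mpr (Or.inr (Finset.mem_insert.mpr (Or.inl hjx)))
        · intro _; trivial
      · simp only [if_neg hjx]
        rw [hvmark j hj hj']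
        constructor
        · intro h
          rcases Finset.mem_union.mp h with h | h
          · exact Finset.mem_union.mpr (Or.inl h)
          · exact Finset.mem_union.mpr (Or.inr (Finset.mem_insert.mpr (Or.inr h)))
        · intro h
          rcases Finset.mem_union.mp h with h | h
          · exact Finset.mem_union.mpr (Or.inl h)
          · rcases Finset.mem_insert.mp h with h | h
            · exact absurd (h ▸ rfl : j = x) hjx
            · exact Finset.mem_union.mpr (Or.inr h)
    have hnext : PySem.List.pyGetD p x 0 = (fL p)^[m - r] i := by
      have : fL p ((fL p)^[m - (r + 1)] i) = (fL p)^[(m - (r + 1)) + 1] i :=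
        (Function.iterate_succ_apply' (fL p) _ i).symm
      rw [show PySem.List.pyGetD p x 0 = fL p x from rfl, hx, this,
        show (m - (r + 1)) + 1 = m - r from by omega]
    have hvlen' : (PySem.List.pySetD v x true).length = p.length := by
      rw [PySem.List.length_pySetD]; exact hvlen
    by_cases hr0 : r = 0
    · -- the walk has come full circle: the next point is i, already marked
      subst hr0
      rw [hstep, hnext]
      obtain ⟨fu2, rfl⟩ : ∃ fu2, fu = fu2 + 1 := ⟨fu - 1, by omega⟩
      have hi_marked : PySem.List.pyGetD (PySem.List.pySetD v x true) ((fL p)^[m - 0] i) false = true := by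
        have hii : (fL p)^[m - 0] i = i := by
          rw [Nat.sub_zero]
          exact Function.iterate_minimalPeriod
        rw [hii]
        rw [(hmark' i h0 h1)]
        exact Finset.mem_union.mpr (Or.inr (Finset.mem_image.mpr ⟨0, by simp; omega, by simp⟩))
      have hret : pvWalk p (fu2 + 1) (PySem.List.pySetD v x true) ((fL p)^[m - 0] i) =
          PySem.List.pySetD v x true := by
        conv_lhs => rw [pvWalk]
        rw [if_neg (by rw [hi_marked]; simp)]
      rw [hret]
      refine ⟨hvlen', ?_⟩
      intro j hj hj'
      rw [hmark' j hj hj', show m - 0 = m from by omega]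
    · exact hstep ▸ hnext ▸ ihr (PySem.List.pySetD v x true) fu hvlen' hmark' (by omega) (by omega) (by omega)

lemma pvWalk_spec (p : List Int) (hp : PermL p) (i : Int) (h0 : 0 ≤ i) (h1 : i < p.length)
    (V : Finset ℤ)
    (hVcl : ∀ x : ℤ, 0 ≤ x → x < p.length → (fL p x ∈ V ↔ x ∈ V)) (hiV : i ∉ V)
    (v : List Bool) (fuel : ℕ) (hvlen : v.length = p.length)
    (hvmark : ∀ j : Int, 0 ≤ j → j < p.length →
      (PySem.List.pyGetD v j false = true ↔ j ∈ V))
    (hfuel : Function.minimalPeriod (fL p) i + 1 ≤ fuel) :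
    (pvWalk p fuel v i).length = p.length ∧
    (∀ j : Int, 0 ≤ j → j < p.length →
      (PySem.List.pyGetD (pvWalk p fuel v i) j false = true ↔
        j ∈ V ∪ (Finset.range (Function.minimalPeriod (fL p) i)).image (fun t => (fL p)^[t] i))) := by
  have hmper := per_exists p hp i h0 h1
  have h := pvWalk_aux p hp i h0 h1 V hVcl hiV (Function.minimalPeriod (fL p) i) v fuel hvlen
    (by intro j hj hj'
        rw [hvmark j hj hj']
        simp)
    hfuel (by omega) le_rfl
  simpa using h

-- joint invariant of the two outer loops after processing indices < i:
-- V is the union of the cycles of the processed indices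
def pvInv (p : List Int) (i : Int) (sA : List Int × Int) (sB : List Bool × Int) : Prop :=
  ∃ V : Finset ℤ,
    (∀ x ∈ V, 0 ≤ x ∧ x < p.length) ∧
    (∀ x : ℤ, 0 ≤ x → x < p.length → (fL p x ∈ V ↔ x ∈ V)) ∧
    (∀ j : ℤ, 0 ≤ j → j < i → j ∈ V) ∧
    sA.1.length = p.length ∧
    (∀ j : ℤ, 0 ≤ j → j < p.length → fL sA.1 j = if j ∈ V then j else fL p j) ∧
    sB.1.length = p.length ∧
    (∀ j : ℤ, 0 ≤ j → j < p.length → (PySem.List.pyGetD sB.1 j false = true ↔ j ∈ V)) ∧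
    sA.2 = (V.card : Int) - sB.2

lemma pvStep (p : List Int) (hp : PermL p) (i : Int) (h0 : 0 ≤ i) (h1 : i < p.length)
    (sA : List Int × Int) (sB : List Bool × Int) (h : pvInv p i sA sB) :
    pvInv p (i + 1) (pvInner i p.length sA.1 sA.2)
      (if PySem.List.pyGetD sB.1 i false = false then (pvWalk p (p.length + 1) sB.1 i, sB.2 + 1) else sB) := by
  obtain ⟨V, hV1, hV2, hV3, hA1, hA2, hB1, hB2, hcnt⟩ := h
  by_cases hiV : i ∈ V
  · -- i lies on an already-processed cycle: both loops do nothing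
    have hfixi : fL sA.1 i = i := by rw [hA2 i h0 h1, if_pos hiV]
    obtain ⟨fu, hfu⟩ : ∃ fu, p.length = fu + 1 := ⟨p.length - 1, by omega⟩
    have hAeq : pvInner i p.length sA.1 sA.2 = sA := by
      rw [hfu]
      conv_lhs => rw [pvInner]
      rw [if_neg (by simpa using (not_not.mpr hfixi))]
    have hBvis : PySem.List.pyGetD sB.1 i false = true := (hB2 i h0 h1).mpr hiV
    rw [hAeq, if_neg (by rw [hBvis]; simp)]
    refine ⟨V, hV1, hV2, ?_, hA1, hA2, hB1, hB2, hcnt⟩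
    intro j hj hj'
    by_cases hji : j = i
    · exact hji ▸ hiV
    · exact hV3 j hj (by omega)
  · -- a fresh cycle: A collapses it by swaps, B walks it once
    have hpA : PermL sA.1 := by
      constructor
      · intro j hj hj'
        rw [hA1] at hj' ⊢
        rw [hA2 j hj hj']
        split_ifs with hjV
        · exact ⟨hj, hj'⟩
        · exact hp.1 j hj hj'
      · intro j k hj hj' hk hk' hjk
        rw [hA1] at hj' hk'
        rw [hA2 j hj hj', hA2 k hk hk'] at hjk
        by_cases hjV : j ∈ V <;> by_cases hkV : k ∈ V
        · rw [if_pos hjV, if_pos hkV] at hjk; exact hjk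
        · rw [if_pos hjV, if_neg hkV] at hjk
          exact ((hkV ((hV2 k hk hk').mp (hjk ▸ hjV)))).elim
        · rw [if_neg hjV, if_pos hkV] at hjk
          exact ((hjV ((hV2 j hj hj').mp (hjk.symm ▸ hkV)))).elim
        · rw [if_neg hjV, if_neg hkV] at hjk
          exact hp.2 j k hj hj' hk hk' hjk
    have hItEq : ∀ k : ℕ, (fL sA.1)^[k] i = (fL p)^[k] i := by
      intro k
      induction k with
      | zero => rfl
      | succ k ih =>
        rw [Function.iterate_succ_apply', Function.iterate_succ_apply', ih]
        have hr := iter_range p hp i h0 h1 k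
        rw [hA2 _ hr.1 hr.2, if_neg (orbit_notin p V hV2 i hp h0 h1 hiV k)]
    have hmper := per_exists p hp i h0 h1
    have hmEq : Function.minimalPeriod (fL sA.1) i = Function.minimalPeriod (fL p) i := by
      apply minimalPeriod_eq_of _ _ _ hmper.1
      · rw [hItEq]; exact Function.iterate_minimalPeriod
      · intro k hk hkm
        rw [hItEq]
        intro hcon
        have h00 : (fL p)^[k] i = (fL p)^[0] i := by simpa using hcon
        have := (Function.iterate_eq_iterate_iff_of_lt_minimalPeriod
          (f := fL p) (x := i) (by omega) (by omega)).mp h00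
        omega
    obtain ⟨l', hrun, hlen', hchar⟩ := pvInner_spec (Function.minimalPeriod (fL p) i)
      sA.1 i sA.2 p.length hpA h0 (by rw [hA1]; exact h1) hmEq (by omega)
    obtain ⟨hwlen, hwmark⟩ := pvWalk_spec p hp i h0 h1 V hV2 hiV sB.1 (p.length + 1) hB1 hB2 (by omega)
    have hBunvis : PySem.List.pyGetD sB.1 i false = false := by
      rcases Bool.eq_false_or_eq_true (PySem.List.pyGetD sB.1 i false) with hb | hb
      · exact ((hiV ((hB2 i h0 h1).mp hb))).elim
      · exact hb
    rw [hrun, if_pos hBunvis]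
    set m := Function.minimalPeriod (fL p) i with hm
    set O := (Finset.range m).image (fun t => (fL p)^[t] i) with hO
    have hOr : ∀ x ∈ O, 0 ≤ x ∧ x < p.length := by
      intro x hx
      obtain ⟨t, _, hteq⟩ := Finset.mem_image.mp hx
      exact hteq ▸ iter_range p hp i h0 h1 t
    have hOcl : ∀ x : ℤ, 0 ≤ x → x < p.length → (fL p x ∈ O ↔ x ∈ O) := by
      intro x hx hx'
      constructor
      · intro hmem
        obtain ⟨t, ht, hteq⟩ := Finset.mem_image.mp hmem
        rw [Finset.mem_range] at ht
        by_cases ht0 : t = 0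
        · subst ht0
          have e : fL p ((fL p)^[m - 1] i) = (fL p)^[m - 1 + 1] i :=
            (Function.iterate_succ_apply' (fL p) (m - 1) i).symm
          rw [show m - 1 + 1 = m from by omega] at e
          have hxi : fL p x = fL p ((fL p)^[m - 1] i) := by
            rw [e, Function.iterate_minimalPeriod, ← hteq]
            simp
          have hxeq := hp.2 x _ hx hx' (iter_range p hp i h0 h1 (m - 1)).1
            (iter_range p hp i h0 h1 (m - 1)).2 hxi
          rw [hxeq]
          exact Finset.mem_image.mpr ⟨m - 1, Finset.mem_range.mpr (by omega), rfl⟩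
        · have e : fL p ((fL p)^[t - 1] i) = (fL p)^[t - 1 + 1] i :=
            (Function.iterate_succ_apply' (fL p) (t - 1) i).symm
          rw [show t - 1 + 1 = t from by omega] at e
          have hxi : fL p x = fL p ((fL p)^[t - 1] i) := by rw [e, hteq]
          have hxeq := hp.2 x _ hx hx' (iter_range p hp i h0 h1 (t - 1)).1
            (iter_range p hp i h0 h1 (t - 1)).2 hxi
          rw [hxeq]
          exact Finset.mem_image.mpr ⟨t - 1, Finset.mem_range.mpr (by omega), rfl⟩
      · intro hmem
        obtain ⟨t, ht, hteq⟩ := Finset.mem_image.mp hmem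
        rw [Finset.mem_range] at ht
        have e : fL p x = (fL p)^[t + 1] i := by rw [← hteq, Function.iterate_succ_apply']
        by_cases htm : t + 1 = m
        · rw [htm] at e
          refine Finset.mem_image.mpr ⟨0, Finset.mem_range.mpr (by omega), ?_⟩
          rw [e, Function.iterate_minimalPeriod]
          simp
        · exact Finset.mem_image.mpr ⟨t + 1, Finset.mem_range.mpr (by omega), e.symm⟩
    have hdisj : Disjoint V O := by
      rw [Finset.disjoint_right]
      intro x hxO hxV
      obtain ⟨t, _, hteq⟩ := Finset.mem_image.mp hxO
      exact orbit_notin p V hV2 i hp h0 h1 hiV t (hteq ▸ hxV)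
    have hcardO : O.card = m := by
      rw [hO, Finset.card_image_of_injOn, Finset.card_range]
      intro t ht u hu htu
      rw [Finset.mem_coe, Finset.mem_range] at ht hu
      exact (Function.iterate_eq_iterate_iff_of_lt_minimalPeriod
        (f := fL p) (x := i) ht hu).mp htu
    refine ⟨V ∪ O, ?_, ?_, ?_, by rw [hlen', hA1], ?_, hwlen, hwmark, ?_⟩
    · intro x hx
      rcases Finset.mem_union.mp hx with hx | hx
      · exact hV1 x hx
      · exact hOr x hx
    · intro x hx hx'
      rw [Finset.mem_union, Finset.mem_union, hV2 x hx hx', hOcl x hx hx']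
    · intro j hj hj'
      by_cases hji : j = i
      · exact Finset.mem_union.mpr (Or.inr (hji ▸
          Finset.mem_image.mpr ⟨0, Finset.mem_range.mpr (by omega), rfl⟩))
      · exact Finset.mem_union.mpr (Or.inl (hV3 j hj (by omega)))
    · intro j hj hj'
      rw [hchar j hj (by rw [hA1]; exact hj')]
      by_cases hjO : j ∈ O
      · rw [if_pos (Finset.mem_union_right _ hjO)]
        obtain ⟨t, ht, hteq⟩ := Finset.mem_image.mp hjO
        rw [Finset.mem_range] at ht
        rw [if_pos ⟨t, ht, by rw [hItEq]; exact hteq⟩]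
      · rw [if_neg (by
          rintro ⟨k, hk, hkeq⟩
          exact hjO (Finset.mem_image.mpr ⟨k, Finset.mem_range.mpr hk, by rw [← hItEq]; exact hkeq⟩))]
        rw [hA2 j hj hj']
        by_cases hjV : j ∈ V
        · rw [if_pos hjV, if_pos (Finset.mem_union_left _ hjV)]
        · rw [if_neg hjV, if_neg (by rw [Finset.mem_union]; push_neg; exact ⟨hjV, hjO⟩)]
    · rw [Finset.card_union_of_disjoint hdisj, hcardO, hcnt]
      push_cast
      ring

lemma pvFold (p : List Int) (hp : PermL p) :
    ∀ i : ℕ, i ≤ p.length →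
      pvInv p (i : Int)
        ((PySem.List.pyRange 0 (i : Int) 1).foldl
          (fun (s : List Int × Int) x => pvInner x p.length s.1 s.2) (p, 0))
        ((PySem.List.pyRange 0 (i : Int) 1).foldl
          (fun (s : List Bool × Int) x =>
            if PySem.List.pyGetD s.1 x false = false then (pvWalk p (p.length + 1) s.1 x, s.2 + 1) else s)
          (List.replicate p.length false, 0)) := by
  intro i
  induction i with
  | zero =>
    intro _
    rw [show ((0 : ℕ) : Int) = 0 from rfl, PySem.List.pyRange_one_eq_nil le_rfl]
    simp only [List.foldl_nil]
    refine ⟨∅, by simp, by simp, by intro j hj hj'; omega, rfl, ?_, by simp, ?_, by simp⟩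
    · intro j hj hj'; simp
    · intro j hj hj'
      simp only [Finset.notMem_empty, iff_false]
      rw [getD_replicate_false p.length j hj hj']
      simp
  | succ i ih =>
    intro hle
    have hcast : ((i + 1 : ℕ) : Int) = (i : Int) + 1 := by push_cast; ring
    rw [hcast, PySem.List.pyRange_one_succ_right (by exact_mod_cast Nat.zero_le i),
      List.foldl_append, List.foldl_append]
    simp only [List.foldl_cons, List.foldl_nil]
    exact pvStep p hp (i : Int) (by exact_mod_cast Nat.zero_le i) (by exact_mod_cast hle) _ _
      (ih (by omega))

-- the heart of the equivalence: on a permutation p of 0..n-1, A's swap count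
-- equals n minus B's cycle count
lemma pvCore (p : List Int) (hp : PermL p) (n : ℕ) (hn : p.length = n) :
    ((PySem.List.pyRange 0 (n : Int) 1).foldl
      (fun (s : List Int × Int) x => pvInner x n s.1 s.2) (p, 0)).2
  = (n : Int) - ((PySem.List.pyRange 0 (n : Int) 1).foldl
      (fun (s : List Bool × Int) x =>
        if PySem.List.pyGetD s.1 x false = false then (pvWalk p (n + 1) s.1 x, s.2 + 1) else s)
      (List.replicate n false, 0)).2 := by
  subst hn
  obtain ⟨V, hV1, hV2, hV3, hA1, hA2, hB1, hB2, hcnt⟩ := pvFold p hp p.length le_rfl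
  have hVeq : V = Finset.Ico (0 : ℤ) (p.length : ℤ) := by
    apply Finset.ext
    intro x
    rw [Finset.mem_Ico]
    exact ⟨fun h => hV1 x h, fun h => hV3 x h.1 h.2⟩
  have hcard : (V.card : Int) = (p.length : Int) := by
    rw [hVeq, Int.card_Ico]
    simp
  rw [hcnt, hcard]

-- reading a list at a possibly negative (wrapping) in-range index, as a mod
lemma getWrap {α : Type} (d : α) (xs : List α) (y : Int)
    (hy : -(xs.length : Int) ≤ y) (hy' : y < xs.length) :
    PySem.List.pyGetD xs y d = PySem.List.pyGetD xs (y % (xs.length : Int)) d := by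
  by_cases h0 : 0 ≤ y
  · rw [Int.emod_eq_of_lt h0 hy']
  · have hmod : y % (xs.length : Int) = y + xs.length := by
      rw [show y % (xs.length : Int) = (y + xs.length) % xs.length from
        (Int.add_emod_right y xs.length).symm, Int.emod_eq_of_lt (by omega) (by omega)]
    rw [hmod]
    have h1 : xs.length - (-y).toNat = (y + (xs.length : Int)).toNat := by omega
    simp only [PySem.List.pyGetD, PySem.List.pyGet?, PySem.List.pyIdx?]
    rw [if_neg h0, if_pos hy, if_pos (show (0 : Int) ≤ y + xs.length from by omega),
      if_pos (show y + (xs.length : Int) < xs.length from by omega), h1]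

-- writing a list at a possibly negative (wrapping) in-range index, pointwise
lemma getSetWrap {α : Type} (d : α) (v : List α) (w x : Int) (val : α)
    (hw : -(v.length : Int) ≤ w) (hw' : w < v.length)
    (hx : 0 ≤ x) (hx' : x < v.length) :
    PySem.List.pyGetD (PySem.List.pySetD v w val) x d
      = if x = w % (v.length : Int) then val else PySem.List.pyGetD v x d := by
  by_cases h0 : 0 ≤ w
  · rw [Int.emod_eq_of_lt h0 hw']
    exact getSet_pt d v w x val h0 hw' hx hx'
  · have hmod : w % (v.length : Int) = w + v.length := by
      rw [show w % (v.length : Int) = (w + v.length) % v.length from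
        (Int.add_emod_right w v.length).symm, Int.emod_eq_of_lt (by omega) (by omega)]
    have hset : PySem.List.pySetD v w val = v.set (v.length - (-w).toNat) val := by
      simp only [PySem.List.pySetD, PySem.List.pySet?, PySem.List.pyIdx?]
      rw [if_neg h0, if_pos hw]
      rfl
    rw [hset, hmod]
    rw [PySem.List.pyGetD_eq_getElem _ d hx (by simpa using hx'),
      PySem.List.pyGetD_eq_getElem _ d hx hx', List.getElem_set]
    by_cases hxe : x = w + (v.length : Int)
    · rw [if_pos (show v.length - (-w).toNat = x.toNat from by omega), if_pos hxe]
    · rw [if_neg (show ¬ v.length - (-w).toNat = x.toNat from by omega), if_neg hxe]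

-- the inversion value after processing only the first t indices
def pvInvUp (perm1 : List Int) (t : ℕ) (x : Int) : Int :=
  match ((List.range t).filter
      (fun (j : ℕ) => PySem.List.pyGetD perm1 (j : Int) 0 % (perm1.length : Int) = x)).getLast? with
  | some j => (j : Int)
  | none => PySem.List.pyGetD perm1 x 0

-- the first two loops of both programs build exactly the list described by pvPVal;
-- under Pre_ it is a permutation of 0..n-1
lemma pvCompose_spec (perm1 perm2 : List Int) (h : Pre_cmp_permutations perm1 perm2) :
    (pvCompose perm1 perm2).length = perm1.length ∧ PermL (pvCompose perm1 perm2) := by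
  obtain ⟨hC1, hC2, hC3, hC4⟩ := h
  -- the inversion loop
  have hinvFold : ∀ t : ℕ, t ≤ perm1.length →
      ((PySem.List.pyRange 0 (t : Int) 1).foldl
        (fun inv x => PySem.List.pySetD inv (PySem.List.pyGetD perm1 x 0) x) perm1).length
        = perm1.length ∧
      (∀ x : ℤ, 0 ≤ x → x < perm1.length →
        fL ((PySem.List.pyRange 0 (t : Int) 1).foldl
          (fun inv x => PySem.List.pySetD inv (PySem.List.pyGetD perm1 x 0) x) perm1) x
          = pvInvUp perm1 t x) := by
    intro t
    induction t with
    | zero =>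
      intro _
      rw [show ((0 : ℕ) : Int) = 0 from rfl, PySem.List.pyRange_one_eq_nil le_rfl]
      simp only [List.foldl_nil]
      refine ⟨by trivial, ?_⟩
      intro x hx hx'
      simp [pvInvUp, fL]
    | succ t ih =>
      intro hle
      obtain ⟨ihlen, ihchar⟩ := ih (by omega)
      have hcast : ((t + 1 : ℕ) : Int) = (t : Int) + 1 := by push_cast; ring
      rw [hcast, PySem.List.pyRange_one_succ_right (by exact_mod_cast Nat.zero_le t),
        List.foldl_append]
      simp only [List.foldl_cons, List.foldl_nil]
      refine ⟨by rw [PySem.List.length_pySetD]; exact ihlen, ?_⟩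
      intro x hx hx'
      have hw := hC1 t (by omega)
      simp only [fL]
      rw [getSetWrap 0 _ (PySem.List.pyGetD perm1 (t : Int) 0) x (t : Int)
        (by rw [ihlen]; exact hw.1) (by rw [ihlen]; exact hw.2) hx (by rw [ihlen]; exact hx')]
      rw [ihlen]
      by_cases hxt : x = PySem.List.pyGetD perm1 (t : Int) 0 % (perm1.length : Int)
      · rw [if_pos hxt]
        have hfilter : (List.range (t + 1)).filter
            (fun (j : ℕ) => PySem.List.pyGetD perm1 (j : Int) 0 % (perm1.length : Int) = x)
            = ((List.range t).filter
                (fun (j : ℕ) => PySem.List.pyGetD perm1 (j : Int) 0 % (perm1.length : Int) = x)) ++ [t] := by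
          rw [List.range_succ, List.filter_append, List.filter_singleton,
            cond_eq_if, if_pos (by exact decide_eq_true hxt.symm)]
        rw [show pvInvUp perm1 (t + 1) x = (t : Int) from by
          simp only [pvInvUp, hfilter, List.getLast?_concat]]
      · rw [if_neg hxt]
        have hfilter : (List.range (t + 1)).filter
            (fun (j : ℕ) => PySem.List.pyGetD perm1 (j : Int) 0 % (perm1.length : Int) = x)
            = (List.range t).filter
                (fun (j : ℕ) => PySem.List.pyGetD perm1 (j : Int) 0 % (perm1.length : Int) = x) := by
          rw [List.range_succ, List.filter_append, List.filter_singleton,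
            cond_eq_if, if_neg (by simp only [decide_eq_true_eq]; exact fun hcon => hxt hcon.symm),
            List.append_nil]
        have := ihchar x hx hx'
        simp only [fL] at this
        rw [this, show pvInvUp perm1 (t + 1) x = pvInvUp perm1 t x from by
          simp only [pvInvUp, hfilter]]
  obtain ⟨hinvlen, hinvchar⟩ := hinvFold perm1.length le_rfl
  obtain ⟨inv, hinv⟩ : ∃ x, x = (PySem.List.pyRange 0 (perm1.length : Int) 1).foldl
      (fun inv x => PySem.List.pySetD inv (PySem.List.pyGetD perm1 x 0) x) perm1 := ⟨_, rfl⟩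
  rw [← hinv] at hinvlen hinvchar
  -- the composition loop
  have hpFold : ∀ i : ℕ, i ≤ perm1.length →
      ((PySem.List.pyRange 0 (i : Int) 1).foldl
        (fun pp x => PySem.List.pySetD pp x
          (PySem.List.pyGetD perm2 (PySem.List.pyGetD inv x 0) 0))
        ((PySem.List.pyRange 0 (perm1.length : Int) 1).map (fun _ => (0 : Int)))).length
        = perm1.length ∧
      (∀ j : ℤ, 0 ≤ j → j < i →
        fL ((PySem.List.pyRange 0 (i : Int) 1).foldl
          (fun pp x => PySem.List.pySetD pp x
            (PySem.List.pyGetD perm2 (PySem.List.pyGetD inv x 0) 0))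
          ((PySem.List.pyRange 0 (perm1.length : Int) 1).map (fun _ => (0 : Int)))) j
          = PySem.List.pyGetD perm2 (fL inv j) 0) := by
    intro i
    induction i with
    | zero =>
      intro _
      rw [show ((0 : ℕ) : Int) = 0 from rfl, PySem.List.pyRange_one_eq_nil le_rfl]
      simp only [List.foldl_nil]
      refine ⟨?_, by intro j hj hj'; omega⟩
      rw [List.length_map, PySem.List.length_pyRange_one]
      simp
    | succ i ih =>
      intro hle
      obtain ⟨ihlen, ihchar⟩ := ih (by omega)
      have hcast : ((i + 1 : ℕ) : Int) = (i : Int) + 1 := by push_cast; ring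
      rw [hcast, PySem.List.pyRange_one_succ_right (by exact_mod_cast Nat.zero_le i),
        List.foldl_append]
      simp only [List.foldl_cons, List.foldl_nil]
      have hi0 : (0 : ℤ) ≤ (i : Int) := by exact_mod_cast Nat.zero_le i
      have hi1 : (i : Int) < perm1.length := by exact_mod_cast hle
      refine ⟨by rw [PySem.List.length_pySetD]; exact ihlen, ?_⟩
      intro j hj hj'
      have hjlt : j < perm1.length := by omega
      simp only [fL]
      rw [getSet_pt 0 _ (i : Int) j _ hi0 (by rw [ihlen]; exact hi1) hj
        (by rw [ihlen]; exact hjlt)]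
      by_cases hji : j = (i : Int)
      · rw [if_pos hji, hji]
      · rw [if_neg hji]
        exact ihchar j hj (by omega)
  obtain ⟨hplen, hpchar⟩ := hpFold perm1.length le_rfl
  have hPeq : pvCompose perm1 perm2 =
      (PySem.List.pyRange 0 (perm1.length : Int) 1).foldl
        (fun pp x => PySem.List.pySetD pp x
          (PySem.List.pyGetD perm2 (PySem.List.pyGetD inv x 0) 0))
        ((PySem.List.pyRange 0 (perm1.length : Int) 1).map (fun _ => (0 : Int))) := by
    rw [hinv]; rfl
  -- the composed list realizes pvPVal
  have hfinal : ∀ j : ℤ, 0 ≤ j → j < perm1.length →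
      fL (pvCompose perm1 perm2) j = pvPVal perm1 perm2 j := by
    intro j hj hj'
    rw [hPeq, hpchar j hj hj']
    have hiv : fL inv j = pvInvVal perm1 j := hinvchar j hj hj'
    have hC2j := hC2 j.toNat (by omega)
    rw [show ((j.toNat : ℕ) : Int) = j from by omega] at hC2j
    rw [show PySem.List.pyGetD perm2 (fL inv j) 0
        = PySem.List.pyGetD perm2 (pvInvVal perm1 j) 0 from by rw [← hiv],
      getWrap 0 perm2 (pvInvVal perm1 j) hC2j.1 hC2j.2]
    rfl
  have hPlen : (pvCompose perm1 perm2).length = perm1.length := by rw [hPeq]; exact hplen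
  refine ⟨hPlen, ?_, ?_⟩
  · intro j hj hj'
    rw [hPlen] at hj' ⊢
    rw [hfinal j hj hj']
    have := hC3 j.toNat (by omega)
    rw [show ((j.toNat : ℕ) : Int) = j from by omega] at this
    exact this
  · intro j k hj hj' hk hk' hjk
    rw [hPlen] at hj' hk'
    rw [hfinal j hj hj', hfinal k hk hk'] at hjk
    have := hC4 j.toNat (by omega) k.toNat (by omega)
      (by rw [show ((j.toNat : ℕ) : Int) = j from by omega,
              show ((k.toNat : ℕ) : Int) = k from by omega]; exact hjk)
    omega

-- ===== VERDICT (by name: the statement is the Claim_ definition above) =====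
theorem cmp_permutations_spec : Claim_equal_cmp_permutations := by
  intro perm1 perm2 _ hpre
  unfold Spec_cmp_permutations
  obtain ⟨hplen, hpperm⟩ := pvCompose_spec perm1 perm2 hpre
  exact pvCore (pvCompose perm1 perm2) hpperm perm1.length hplen
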